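-- pv_equiv track=rewrite | github.com/zera-bot/Maltese-Gear-Cube-Simulator | sim.py | rotateAxes
-- ===== SOURCE A (Python) =====
-- x_rot = ["F","U","B","D"]
--
-- y_rot = ["R","F","L","B"]
--
-- z_rot = ["U","R","D","L"]
--
-- def rotateAxes(origin,axes:list):
--     """
--     Format of `axes` is something like the following:
--     `[["y",1], ["x",-1], ["y",2]]`
--     """
--     prime = origin
--     for i in axes:
--         primeList = [*prime]
--
--         l = None
--         if i[0] == "x": l = x_rot
--         elif i[0] == "y": l = y_rot
--         elif i[0] == "z": l = z_rot
--
--         for charInd,char in enumerate(primeList):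
--             if char not in l: continue
--             index = l.index(char)
--             new_index = (index + i[1]) % len(l)
--             primeList[charInd] = l[new_index]
--
--         prime = "".join(primeList)
--     return prime
-- ===== SOURCE B (Python) =====
-- _ROTS = {"x": ["F", "U", "B", "D"], "y": ["R", "F", "L", "B"], "z": ["U", "R", "D", "L"]}
--
-- def rotateAxes(origin, axes: list):
--     # Fold all axis rotations into one face-relabelling table, then map origin once.
--     table = {f: f for f in "FUBDRL"}
--     for axis in axes:
--         rot = _ROTS.get(axis[0])
--         if rot is None:
--             continue
--         table = {f: (rot[(rot.index(c) + axis[1]) % 4] if c in rot else c)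
--                  for f, c in table.items()}
--     return "".join(table.get(c, c) for c in origin)
-- ===== Notes on version B (the rewrite author's own statement) =====
-- stated objective: alternative
-- what changed: Instead of rewriting the whole string once per axis (A's nested loops over the string), B folds the axis sequence into a single 6-entry face-relabelling table and then maps the origin string through it in one pass.
import Mathlib
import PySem

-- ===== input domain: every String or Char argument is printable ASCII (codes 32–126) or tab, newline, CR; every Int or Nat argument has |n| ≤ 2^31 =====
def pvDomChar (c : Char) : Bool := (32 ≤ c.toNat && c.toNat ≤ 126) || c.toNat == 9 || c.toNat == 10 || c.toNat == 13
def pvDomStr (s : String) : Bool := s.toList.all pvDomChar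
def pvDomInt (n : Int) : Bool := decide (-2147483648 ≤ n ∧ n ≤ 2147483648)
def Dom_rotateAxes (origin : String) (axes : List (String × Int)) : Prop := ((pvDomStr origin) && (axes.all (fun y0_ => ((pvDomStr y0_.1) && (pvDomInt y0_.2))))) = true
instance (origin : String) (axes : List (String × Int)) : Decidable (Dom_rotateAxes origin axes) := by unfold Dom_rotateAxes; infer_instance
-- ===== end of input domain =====

-- B folds all axis rotations into ONE 6-face relabelling table and maps origin once
-- (alternative decomposition; not claimed faster); A raises TypeError on invalid axes
-- with non-empty origin (those inputs are excluded by Pre_; B returns a value there).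

-- ===== PORT A =====
def pv_xrot : List Char := ['F', 'U', 'B', 'D']
def pv_yrot : List Char := ['R', 'F', 'L', 'B']
def pv_zrot : List Char := ['U', 'R', 'D', 'L']

def pvPickA (a : String) : Option (List Char) :=
  if a == "x" then some pv_xrot
  else if a == "y" then some pv_yrot
  else if a == "z" then some pv_zrot
  else none

-- inner per-character loop of A: each position is replaced by l[(l.index(char)+amt) % len(l)]
-- when char ∈ l (getD's default is unreachable: the index is in range, as in the Python)
def pvInnerA (l : List Char) (amt : Int) : List Char → List Char
  | [] => []
  | c :: rest =>
      (if c ∈ l then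
        l.getD (PySem.Int.mod ((((PySem.List.index? l c).getD 0 : Nat) : Int) + amt) (l.length : Int)).toNat c
      else c) :: pvInnerA l amt rest

def rotateAxes (origin : String) (axes : List (String × Int)) : String :=
  String.ofList (axes.foldl (fun prime i =>
    match pvPickA i.1 with
    | none => prime                       -- Python raises TypeError here when prime ≠ []; outside Pre_
    | some l => pvInnerA l i.2 prime) origin.toList)

-- ===== PORT B =====
def pvRots : List (String × List Char) :=
  [("x", ['F', 'U', 'B', 'D']), ("y", ['R', 'F', 'L', 'B']), ("z", ['U', 'R', 'D', 'L'])]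

def pvStepB (rot : List Char) (amt : Int) (c : Char) : Char :=
  if c ∈ rot then
    rot.getD (PySem.Int.mod ((((PySem.List.index? rot c).getD 0 : Nat) : Int) + amt) 4).toNat c
  else c

def pvBase : List (Char × Char) :=
  [('F', 'F'), ('U', 'U'), ('B', 'B'), ('D', 'D'), ('R', 'R'), ('L', 'L')]

def rotateAxes_alt (origin : String) (axes : List (String × Int)) : String :=
  String.ofList (origin.toList.map (fun c =>
    ((axes.foldl (fun t i =>
        match pvRots.lookup i.1 with
        | none => t
        | some rot => t.map (fun kv => (kv.1, pvStepB rot i.2 kv.2))) pvBase).lookup c).getD c))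

-- ===== PRECONDITION & SPEC =====
-- Pre_ excludes exactly the inputs where A raises TypeError ('char not in None'):
-- a non-empty origin together with some axis whose name is not "x"/"y"/"z".
def Pre_rotateAxes (origin : String) (axes : List (String × Int)) : Prop :=
  origin = "" ∨ ∀ i ∈ axes, i.1 = "x" ∨ i.1 = "y" ∨ i.1 = "z"
instance (origin : String) (axes : List (String × Int)) : Decidable (Pre_rotateAxes origin axes) := by
  unfold Pre_rotateAxes; infer_instance

def pvWitness_rotateAxes : String × (List (String × Int)) := ("FRUBDLq", [("x", 1), ("y", -3), ("z", 6)])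

def Spec_rotateAxes (origin : String) (axes : List (String × Int)) (out : String) : Prop := out = rotateAxes_alt origin axes
instance (origin : String) (axes : List (String × Int)) (out : String) : Decidable (Spec_rotateAxes origin axes out) := by unfold Spec_rotateAxes; infer_instance

-- ===== CLAIM (what is proved, stated in full; the proofs are below) =====
def Claim_equal_rotateAxes : Prop := ∀ (origin : String) (axes : List (String × Int)), Dom_rotateAxes origin axes → Pre_rotateAxes origin axes → Spec_rotateAxes origin axes (rotateAxes origin axes)

-- ===== LEMMAS AND PROOFS =====

def pvFaces : List Char := ['F', 'U', 'B', 'D', 'R', 'L']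

/-- composed relabelling of a single face under the whole axis sequence -/
def pvComp (axes : List (String × Int)) (c : Char) : Char :=
  axes.foldl (fun c i => match pvRots.lookup i.1 with
    | none => c
    | some rot => pvStepB rot i.2 c) c

lemma pick_eq (a : String) : pvPickA a = pvRots.lookup a := by
  unfold pvPickA pvRots
  rcases hx : a == "x" <;> rcases hy : a == "y" <;> rcases hz : a == "z" <;>
    simp [List.lookup, hx, hy, hz, pv_xrot, pv_yrot, pv_zrot]

lemma pick_len {a : String} {l : List Char} (h : pvPickA a = some l) : l.length = 4 := by
  unfold pvPickA at h
  split_ifs at h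
  all_goals cases h
  all_goals rfl

lemma pick_sub {a : String} {l : List Char} (h : pvPickA a = some l) :
    ∀ c ∈ l, c ∈ pvFaces := by
  unfold pvPickA at h
  split_ifs at h
  all_goals cases h
  all_goals intro c hc; fin_cases hc <;> decide

lemma innerA_eq_map (l : List Char) (hl : l.length = 4) (amt : Int) (xs : List Char) :
    pvInnerA l amt xs = xs.map (pvStepB l amt) := by
  induction xs with
  | nil => rfl
  | cons c rest ih =>
      simp only [pvInnerA, List.map, ih, pvStepB, hl]
      norm_num

lemma A_eq_comp (axes : List (String × Int)) (xs : List Char) :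
    axes.foldl (fun prime i =>
      match pvPickA i.1 with
      | none => prime
      | some l => pvInnerA l i.2 prime) xs = xs.map (pvComp axes) := by
  induction axes generalizing xs with
  | nil => have h : pvComp [] = fun c => c := rfl
           simp [h]
  | cons i rest ih =>
      simp only [List.foldl_cons]
      rcases hp : pvPickA i.1 with _ | l <;> dsimp only
      · rw [ih]
        apply List.map_congr_left
        intro c _
        simp [pvComp, ← pick_eq, hp]
      · rw [innerA_eq_map l (pick_len hp) i.2, ih, List.map_map]
        apply List.map_congr_left
        intro c _
        simp [pvComp, Function.comp, ← pick_eq, hp]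

lemma table_eq_comp (axes : List (String × Int)) (t : List (Char × Char)) :
    axes.foldl (fun t i =>
      match pvRots.lookup i.1 with
      | none => t
      | some rot => t.map (fun kv => (kv.1, pvStepB rot i.2 kv.2))) t
      = t.map (fun kv => (kv.1, pvComp axes kv.2)) := by
  induction axes generalizing t with
  | nil => have h : pvComp [] = fun c => c := rfl
           simp [h]
  | cons i rest ih =>
      simp only [List.foldl_cons]
      rcases hp : pvRots.lookup i.1 with _ | rot <;> dsimp only
      · rw [ih]
        apply List.map_congr_left
        intro kv _
        simp [pvComp, hp]
      · rw [ih, List.map_map]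
        apply List.map_congr_left
        intro kv _
        simp [pvComp, Function.comp, hp]

lemma lookup_base_map (G : Char → Char) (c : Char) :
    (pvBase.map (fun kv => (kv.1, G kv.2))).lookup c
      = if c ∈ pvFaces then some (G c) else none := by
  rcases h1 : c == 'F' <;> rcases h2 : c == 'U' <;> rcases h3 : c == 'B' <;>
    rcases h4 : c == 'D' <;> rcases h5 : c == 'R' <;> rcases h6 : c == 'L' <;>
    simp [pvBase, pvFaces, List.lookup, h1, h2, h3, h4, h5, h6] <;>
    simp_all

lemma nonface_fixed (axes : List (String × Int)) (c : Char) (hc : c ∉ pvFaces) :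
    pvComp axes c = c := by
  induction axes with
  | nil => rfl
  | cons i rest ih =>
      have hstep : (match pvRots.lookup i.1 with
          | none => c
          | some rot => pvStepB rot i.2 c) = c := by
        rcases hp : pvRots.lookup i.1 with _ | rot
        · rfl
        · have hsub := pick_sub (l := rot) (a := i.1) (by rw [pick_eq, hp])
          have : c ∉ rot := fun hm => hc (hsub c hm)
          simp [pvStepB, this]
      simp only [pvComp, List.foldl_cons, hstep]
      exact ih

lemma B_eq_comp (origin : String) (axes : List (String × Int)) :
    rotateAxes_alt origin axes = String.ofList (origin.toList.map (pvComp axes)) := by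
  unfold rotateAxes_alt
  simp only [table_eq_comp]
  congr 1
  apply List.map_congr_left
  intro c _
  rw [lookup_base_map]
  by_cases h : c ∈ pvFaces
  · simp [h]
  · simp [h, nonface_fixed axes c h]

-- ===== VERDICT (by name: the statement is the Claim_ definition above) =====
theorem rotateAxes_spec : Claim_equal_rotateAxes := by
  intro origin axes _ _
  show rotateAxes origin axes = rotateAxes_alt origin axes
  rw [rotateAxes, A_eq_comp, B_eq_comp]
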